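-- pv_equiv track=rewrite | github.com/iyiola1985/Palindrome | palindrome.py | fill_palindrome
-- ===== SOURCE A (Python) =====
-- def fill_palindrome(S):
--     # Convert to list for easier manipulation
--     chars = list(S)
--     N = len(chars)
--
--     # Check for palindrome and fill in question marks
--     for i in range(N // 2):
--         left = chars[i]
--         right = chars[N - 1 - i]
--
--         # Case 1: If both are question marks
--         if left == '?' and right == '?':
--             chars[i] = chars[N - 1 - i] = 'a'
--         # Case 2: If only left is question mark
--         elif left == '?':
--             chars[i] = right
--         # Case 3: If only right is question mark
--         elif right == '?':
--             chars[N - 1 - i] = left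
--         # Case 4: If neither are question marks and don't match
--         elif left != right:
--             return "NO"
--
--     # Handle middle character for odd length strings
--     if N % 2 == 1 and chars[N // 2] == '?':
--         chars[N // 2] = 'a'
--
--     return ''.join(chars)
-- ===== SOURCE B (Python) =====
-- def fill_palindrome(S):
--     chars = list(S)
--     N = len(chars)
--     # Single forward fill pass: every '?' copies its (possibly already filled)
--     # mirror when that is not '?', else becomes 'a'.
--     for i in range(N):
--         if chars[i] == '?':
--             m = chars[N - 1 - i]
--             chars[i] = m if m != '?' else 'a'
--     r = ''.join(chars)
--     return r if r == r[::-1] else "NO"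
-- ===== Notes on version B (the rewrite author's own statement) =====
-- stated objective: simpler
-- what changed: A interleaves mismatch detection and question-mark filling in one early-returning pass over mirror index pairs; B separates concerns: a plain forward pass fills every question mark from its mirror character (falling back to the letter a), then a single reverse-comparison decides between the filled string and the failure answer.
import Mathlib
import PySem

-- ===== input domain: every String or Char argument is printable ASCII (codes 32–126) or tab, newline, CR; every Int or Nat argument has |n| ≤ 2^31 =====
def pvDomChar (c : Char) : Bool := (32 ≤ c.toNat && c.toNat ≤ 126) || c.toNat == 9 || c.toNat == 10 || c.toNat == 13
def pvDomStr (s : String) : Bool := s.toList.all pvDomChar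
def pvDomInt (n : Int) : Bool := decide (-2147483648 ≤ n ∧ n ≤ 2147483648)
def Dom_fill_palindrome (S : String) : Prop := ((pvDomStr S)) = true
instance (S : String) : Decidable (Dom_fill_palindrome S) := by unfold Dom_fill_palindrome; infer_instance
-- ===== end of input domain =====

-- B replaces A's interleaved check-and-fill pass over index pairs (with early return)
-- by a plain forward fill pass over all indices followed by a separate
-- reverse-compare verification (simpler decomposition; same linear cost).

-- ===== PORT A =====
-- A's loop 'for i in range(N // 2)', carried as structural recursion on the number
-- of remaining iterations; 'none' is A's early 'return "NO"'.  All indexed reads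
-- are in range (i < N/2), so getD's default is never used.
def fillPalLoopA (N : Nat) : Nat → Nat → List Char → Option (List Char)
  | 0, _, chars => some chars
  | fuel + 1, i, chars =>
    let left := chars.getD i ' '
    let right := chars.getD (N - 1 - i) ' '
    if left = '?' ∧ right = '?' then
      fillPalLoopA N fuel (i + 1) ((chars.set i 'a').set (N - 1 - i) 'a')
    else if left = '?' then
      fillPalLoopA N fuel (i + 1) (chars.set i right)
    else if right = '?' then
      fillPalLoopA N fuel (i + 1) (chars.set (N - 1 - i) left)
    else if left ≠ right then
      none
    else
      fillPalLoopA N fuel (i + 1) chars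

def fill_palindrome (S : String) : String :=
  let chars := S.toList
  let N := chars.length
  match fillPalLoopA N (N / 2) 0 chars with
  | none => "NO"
  | some chars2 =>
    let chars3 := if N % 2 = 1 ∧ chars2.getD (N / 2) ' ' = '?' then chars2.set (N / 2) 'a' else chars2
    String.mk chars3

-- ===== PORT B =====
-- B's loop 'for i in range(N)', filling every '?' from its (possibly already
-- filled) mirror; recursion on the number of remaining iterations.
def fillPalLoopB (N : Nat) : Nat → Nat → List Char → List Char
  | 0, _, chars => chars
  | fuel + 1, i, chars =>
    let c := chars.getD i ' '
    fillPalLoopB N fuel (i + 1)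
      (if c = '?' then
        (let m := chars.getD (N - 1 - i) ' '
         chars.set i (if m ≠ '?' then m else 'a'))
      else chars)

def fill_palindrome_alt (S : String) : String :=
  let chars := S.toList
  let N := chars.length
  let r := fillPalLoopB N N 0 chars
  if String.mk r = String.mk r.reverse then String.mk r else "NO"

-- ===== PRECONDITION & SPEC =====
def Spec_fill_palindrome (S : String) (out : String) : Prop := out = fill_palindrome_alt S
instance (S : String) (out : String) : Decidable (Spec_fill_palindrome S out) := by unfold Spec_fill_palindrome; infer_instance

-- ===== CLAIM (what is proved, stated in full; the proofs are below) =====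
def Claim_equal_fill_palindrome : Prop := ∀ (S : String), Dom_fill_palindrome S → Spec_fill_palindrome S (fill_palindrome S)

-- ===== LEMMAS AND PROOFS =====

-- The value position j holds after all filling, expressed on the ORIGINAL list.
def gFill (orig : List Char) (j : Nat) : Char :=
  if orig.getD j ' ' = '?' then
    (if orig.getD (orig.length - 1 - j) ' ' ≠ '?' then orig.getD (orig.length - 1 - j) ' ' else 'a')
  else orig.getD j ' '

-- A mismatched pair of the original list (both fixed, different).
def badPair (orig : List Char) (k : Nat) : Prop :=
  orig.getD k ' ' ≠ '?' ∧ orig.getD (orig.length - 1 - k) ' ' ≠ '?' ∧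
    orig.getD k ' ' ≠ orig.getD (orig.length - 1 - k) ' '

theorem getD_set_ne (l : List Char) (i j : Nat) (c d : Char) (h : i ≠ j) :
    (l.set i c).getD j d = l.getD j d := by
  simp [List.getD, List.getElem?_set_ne h]

theorem getD_set_self (l : List Char) (i : Nat) (c d : Char) (h : i < l.length) :
    (l.set i c).getD i d = c := by
  simp [List.getD, h]

theorem getD_reverse (l : List Char) (i : Nat) (d : Char) (h : i < l.length) :
    l.reverse.getD i d = l.getD (l.length - 1 - i) d := by
  rw [List.getD_eq_getElem _ _ (by simpa using h), List.getD_eq_getElem _ _ (by omega),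
    List.getElem_reverse]

theorem eq_of_getD (l1 l2 : List Char) (h : l1.length = l2.length)
    (h2 : ∀ j, j < l1.length → l1.getD j ' ' = l2.getD j ' ') : l1 = l2 := by
  apply List.ext_getElem h
  intro i h1 h2'
  have := h2 i h1
  rwa [List.getD_eq_getElem _ _ h1, List.getD_eq_getElem _ _ h2'] at this

-- If some remaining pair mismatches, A's loop returns none ("NO").
theorem loopA_bad (orig : List Char) :
    ∀ fuel i chars, i + fuel = orig.length / 2 → chars.length = orig.length →
    (∀ j, i ≤ j → j < orig.length - i → chars.getD j ' ' = orig.getD j ' ') →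
    (∃ k, i ≤ k ∧ k < orig.length / 2 ∧ badPair orig k) →
    fillPalLoopA orig.length fuel i chars = none := by
  intro fuel
  induction fuel with
  | zero =>
    intro i chars h1 h2 inv hk
    obtain ⟨k, hk1, hk2, _⟩ := hk
    omega
  | succ fuel ih =>
    intro i chars h1 h2 inv hk
    obtain ⟨k, hk1, hk2, hbad⟩ := hk
    have hi : i < orig.length / 2 := by omega
    have hiN : i < orig.length := by omega
    have hii : i < orig.length - 1 - i := by omega
    have hl : chars.getD i ' ' = orig.getD i ' ' := inv i (le_refl i) (by omega)
    have hr : chars.getD (orig.length - 1 - i) ' ' = orig.getD (orig.length - 1 - i) ' ' :=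
      inv _ (by omega) (by omega)
    simp only [fillPalLoopA]
    rw [hl, hr]
    by_cases hbi : badPair orig i
    · obtain ⟨b1, b2, b3⟩ := hbi
      rw [if_neg (by exact fun h => b1 h.1), if_neg b1, if_neg b2, if_pos b3]
    · have hki : i + 1 ≤ k := by
        rcases Nat.eq_or_lt_of_le hk1 with h | h
        · exact absurd (h ▸ hbad) hbi
        · omega
      by_cases c1 : orig.getD i ' ' = '?' <;> by_cases c2 : orig.getD (orig.length - 1 - i) ' ' = '?'
      · rw [if_pos ⟨c1, c2⟩]
        apply ih (i + 1) _ (by omega) (by simpa using h2)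
        · intro j hj1 hj2
          rw [getD_set_ne _ _ _ _ _ (by omega), getD_set_ne _ _ _ _ _ (by omega)]
          exact inv j (by omega) (by omega)
        · exact ⟨k, hki, hk2, hbad⟩
      · rw [if_neg (fun h => c2 h.2), if_pos c1]
        apply ih (i + 1) _ (by omega) (by simpa using h2)
        · intro j hj1 hj2
          rw [getD_set_ne _ _ _ _ _ (by omega)]
          exact inv j (by omega) (by omega)
        · exact ⟨k, hki, hk2, hbad⟩
      · rw [if_neg (fun h => c1 h.1), if_neg c1, if_pos c2]
        apply ih (i + 1) _ (by omega) (by simpa using h2)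
        · intro j hj1 hj2
          rw [getD_set_ne _ _ _ _ _ (by omega)]
          exact inv j (by omega) (by omega)
        · exact ⟨k, hki, hk2, hbad⟩
      · have heq : orig.getD i ' ' = orig.getD (orig.length - 1 - i) ' ' := by
          by_contra hne
          exact hbi ⟨c1, c2, hne⟩
        rw [if_neg (fun h => c1 h.1), if_neg c1, if_neg c2, if_neg (not_not_intro heq)]
        apply ih (i + 1) _ (by omega) h2
        · intro j hj1 hj2
          exact inv j (by omega) (by omega)
        · exact ⟨k, hki, hk2, hbad⟩

-- If no remaining pair mismatches, A's loop fills every processed position with gFill.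
theorem loopA_good (orig : List Char) :
    ∀ fuel i chars, i + fuel = orig.length / 2 → chars.length = orig.length →
    (∀ j, i ≤ j → j < orig.length - i → chars.getD j ' ' = orig.getD j ' ') →
    (∀ j, j < orig.length → (j < i ∨ orig.length - i ≤ j) → chars.getD j ' ' = gFill orig j) →
    (∀ k, i ≤ k → k < orig.length / 2 → ¬ badPair orig k) →
    ∃ L, fillPalLoopA orig.length fuel i chars = some L ∧ L.length = orig.length ∧
      (∀ j, orig.length / 2 ≤ j → j < orig.length - orig.length / 2 →
        L.getD j ' ' = orig.getD j ' ') ∧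
      (∀ j, j < orig.length → (j < orig.length / 2 ∨ orig.length - orig.length / 2 ≤ j) →
        L.getD j ' ' = gFill orig j) := by
  intro fuel
  induction fuel with
  | zero =>
    intro i chars h1 h2 inv3 inv4 hnb
    refine ⟨chars, by simp [fillPalLoopA], h2, ?_, ?_⟩
    · intro j hj1 hj2
      exact inv3 j (by omega) (by omega)
    · intro j hj hcase
      exact inv4 j hj (by omega)
  | succ fuel ih =>
    intro i chars h1 h2 inv3 inv4 hnb
    have hi : i < orig.length / 2 := by omega
    have hiN : i < orig.length := by omega
    have hii : i < orig.length - 1 - i := by omega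
    have hmi : orig.length - 1 - (orig.length - 1 - i) = i := by omega
    have hl : chars.getD i ' ' = orig.getD i ' ' := inv3 i (le_refl i) (by omega)
    have hr : chars.getD (orig.length - 1 - i) ' ' = orig.getD (orig.length - 1 - i) ' ' :=
      inv3 _ (by omega) (by omega)
    have hnb' : ∀ k, i + 1 ≤ k → k < orig.length / 2 → ¬ badPair orig k :=
      fun k hk1 hk2 => hnb k (by omega) hk2
    simp only [fillPalLoopA]
    rw [hl, hr]
    by_cases c1 : orig.getD i ' ' = '?' <;> by_cases c2 : orig.getD (orig.length - 1 - i) ' ' = '?'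
    · rw [if_pos ⟨c1, c2⟩]
      apply ih (i + 1) _ (by omega) (by simpa using h2) _ _ hnb'
      · intro j hj1 hj2
        rw [getD_set_ne _ _ _ _ _ (by omega), getD_set_ne _ _ _ _ _ (by omega)]
        exact inv3 j (by omega) (by omega)
      · intro j hj hcase
        by_cases hji : j = i
        · subst hji
          rw [getD_set_ne _ _ _ _ _ (by omega), getD_set_self _ _ _ _ (by omega)]
          unfold gFill
          rw [if_pos c1, if_neg (not_not_intro c2)]
        · by_cases hjm : j = orig.length - 1 - i
          · subst hjm
            rw [getD_set_self _ _ _ _ (by simp only [List.length_set]; omega)]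
            unfold gFill
            rw [if_pos c2, hmi, if_neg (not_not_intro c1)]
          · rw [getD_set_ne _ _ _ _ _ (by omega), getD_set_ne _ _ _ _ _ (by omega)]
            exact inv4 j hj (by omega)
    · rw [if_neg (fun h => c2 h.2), if_pos c1]
      apply ih (i + 1) _ (by omega) (by simpa using h2) _ _ hnb'
      · intro j hj1 hj2
        rw [getD_set_ne _ _ _ _ _ (by omega)]
        exact inv3 j (by omega) (by omega)
      · intro j hj hcase
        by_cases hji : j = i
        · subst hji
          rw [getD_set_self _ _ _ _ (by omega)]
          unfold gFill
          rw [if_pos c1, if_pos c2]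
        · by_cases hjm : j = orig.length - 1 - i
          · subst hjm
            rw [getD_set_ne _ _ _ _ _ (by omega), hr]
            unfold gFill
            rw [if_neg c2]
          · rw [getD_set_ne _ _ _ _ _ (by omega)]
            exact inv4 j hj (by omega)
    · rw [if_neg (fun h => c1 h.1), if_neg c1, if_pos c2]
      apply ih (i + 1) _ (by omega) (by simpa using h2) _ _ hnb'
      · intro j hj1 hj2
        rw [getD_set_ne _ _ _ _ _ (by omega)]
        exact inv3 j (by omega) (by omega)
      · intro j hj hcase
        by_cases hji : j = i
        · subst hji
          rw [getD_set_ne _ _ _ _ _ (by omega), hl]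
          unfold gFill
          rw [if_neg c1]
        · by_cases hjm : j = orig.length - 1 - i
          · subst hjm
            rw [getD_set_self _ _ _ _ (by omega)]
            unfold gFill
            rw [if_pos c2, hmi, if_pos c1]
          · rw [getD_set_ne _ _ _ _ _ (by omega)]
            exact inv4 j hj (by omega)
    · have heq : orig.getD i ' ' = orig.getD (orig.length - 1 - i) ' ' := by
        by_contra hne
        exact hnb i (by omega) hi ⟨c1, c2, hne⟩
      rw [if_neg (fun h => c1 h.1), if_neg c1, if_neg c2, if_neg (not_not_intro heq)]
      apply ih (i + 1) _ (by omega) h2 _ _ hnb'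
      · intro j hj1 hj2
        exact inv3 j (by omega) (by omega)
      · intro j hj hcase
        by_cases hji : j = i
        · subst hji
          rw [hl]
          unfold gFill
          rw [if_neg c1]
        · by_cases hjm : j = orig.length - 1 - i
          · subst hjm
            rw [hr]
            unfold gFill
            rw [if_neg c2]
          · exact inv4 j hj (by omega)

-- B's loop fills every position with gFill.
theorem loopB_spec (orig : List Char) :
    ∀ fuel i chars, i + fuel = orig.length → chars.length = orig.length →
    (∀ j, j < i → chars.getD j ' ' = gFill orig j) →
    (∀ j, i ≤ j → chars.getD j ' ' = orig.getD j ' ') →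
    (fillPalLoopB orig.length fuel i chars).length = orig.length ∧
      ∀ j, j < orig.length →
        (fillPalLoopB orig.length fuel i chars).getD j ' ' = gFill orig j := by
  intro fuel
  induction fuel with
  | zero =>
    intro i chars h1 h2 inv1 inv2
    simp only [fillPalLoopB]
    exact ⟨h2, fun j hj => inv1 j (by omega)⟩
  | succ fuel ih =>
    intro i chars h1 h2 inv1 inv2
    have hi : i < orig.length := by omega
    have hi' : i < chars.length := by omega
    have horig : chars.getD i ' ' = orig.getD i ' ' := inv2 i (le_refl i)
    simp only [fillPalLoopB]
    by_cases hc : chars.getD i ' ' = '?'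
    · rw [if_pos hc]
      apply ih (i + 1) _ (by omega) (by simpa using h2)
      · intro j hj
        rcases Nat.lt_or_ge j i with hji | hji
        · rw [getD_set_ne _ _ _ _ _ (by omega)]
          exact inv1 j hji
        · have hj' : j = i := by omega
          subst hj'
          rw [getD_set_self _ _ _ _ hi']
          have hq : orig.getD j ' ' = '?' := by rw [← horig]; exact hc
          rcases Nat.lt_trichotomy j (orig.length - 1 - j) with hm | hm | hm
          · have h3 : chars.getD (orig.length - 1 - j) ' ' = orig.getD (orig.length - 1 - j) ' ' :=
              inv2 _ (by omega)
            unfold gFill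
            rw [h3, if_pos hq]
          · unfold gFill
            rw [if_pos hq, ← hm, hc]
            simp only [List.getD] at hq ⊢
            simp [hq]
          · have hk : chars.getD (orig.length - 1 - j) ' ' = gFill orig (orig.length - 1 - j) :=
              inv1 _ (by omega)
            have hmi : orig.length - 1 - (orig.length - 1 - j) = j := by omega
            rw [hk]
            unfold gFill
            rw [hmi]
            by_cases hok : orig.getD (orig.length - 1 - j) ' ' = '?'
            · simp only [List.getD] at hq hok ⊢
              simp [hq, hok]
            · simp only [List.getD] at hq hok ⊢
              simp [hq, hok]
      · intro j hj
        rw [getD_set_ne _ _ _ _ _ (by omega)]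
        exact inv2 j (by omega)
    · rw [if_neg hc]
      apply ih (i + 1) _ (by omega) h2
      · intro j hj
        rcases Nat.lt_or_ge j i with hji | hji
        · exact inv1 j hji
        · have hj' : j = i := by omega
          subst hj'
          have hq : orig.getD j ' ' ≠ '?' := by rw [← horig]; exact hc
          rw [horig]
          unfold gFill
          rw [if_neg hq]
      · intro j hj
        exact inv2 j (by omega)

-- gFill is symmetric when no pair mismatches.
theorem gFill_symm (orig : List Char) (j : Nat) (hj : j < orig.length)
    (hnb : ∀ k, k < orig.length / 2 → ¬ badPair orig k) :
    gFill orig (orig.length - 1 - j) = gFill orig j := by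
  have hmj : orig.length - 1 - (orig.length - 1 - j) = j := by omega
  by_cases hjj : j = orig.length - 1 - j
  · rw [← hjj]
  · unfold gFill
    rw [hmj]
    by_cases a : orig.getD j ' ' = '?' <;>
      by_cases b : orig.getD (orig.length - 1 - j) ' ' = '?'
    · rw [if_pos a, if_pos b, if_neg (not_not_intro a), if_neg (not_not_intro b)]
    · rw [if_pos a, if_neg b, if_pos b]
    · rw [if_neg a, if_pos b, if_pos a]
    · rw [if_neg a, if_neg b]
      rcases Nat.lt_or_ge j (orig.length - 1 - j) with hlt | hge
    
      · have heq : orig.getD j ' ' = orig.getD (orig.length - 1 - j) ' ' := by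
          by_contra h
          exact hnb j (by omega) ⟨a, b, h⟩
        exact heq.symm
      · have hlt' : orig.length - 1 - j < j := by omega
        have heq : orig.getD (orig.length - 1 - j) ' ' = orig.getD j ' ' := by
          by_contra h
          refine hnb (orig.length - 1 - j) (by omega) ?_
          unfold badPair
          rw [hmj]
          exact ⟨b, a, h⟩
        exact heq

-- ===== VERDICT (by name: the statement is the Claim_ definition above) =====
theorem fill_palindrome_spec : Claim_equal_fill_palindrome := by
  intro S _hdom
  simp only [Spec_fill_palindrome, fill_palindrome, fill_palindrome_alt]
  obtain ⟨hBlen, hBval⟩ :=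
    loopB_spec S.toList S.toList.length 0 S.toList (by omega) rfl
      (fun j hj => absurd hj (by omega)) (fun j _ => rfl)
  by_cases hbad : ∃ k, k < S.toList.length / 2 ∧ badPair S.toList k
  · obtain ⟨k, hk2, hbk⟩ := hbad
    have hA : fillPalLoopA S.toList.length (S.toList.length / 2) 0 S.toList = none :=
      loopA_bad S.toList (S.toList.length / 2) 0 S.toList (by omega) rfl
        (fun j _ _ => rfl) ⟨k, Nat.zero_le k, hk2, hbk⟩
    rw [hA]
    have hkN : k < S.toList.length := by omega
    obtain ⟨b1, b2, b3⟩ := hbk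
    have hne : ¬ (String.mk (fillPalLoopB S.toList.length S.toList.length 0 S.toList) =
        String.mk (fillPalLoopB S.toList.length S.toList.length 0 S.toList).reverse) := by
      intro hmk
      have hLrev := String.ofList_inj.mp hmk
      have h1 : (fillPalLoopB S.toList.length S.toList.length 0 S.toList).getD k ' ' =
          S.toList.getD k ' ' := by
        rw [hBval k hkN]
        unfold gFill
        rw [if_neg b1]
      have h2 : (fillPalLoopB S.toList.length S.toList.length 0 S.toList).reverse.getD k ' ' =
          S.toList.getD (S.toList.length - 1 - k) ' ' := by
        rw [getD_reverse _ _ _ (by omega), hBlen, hBval _ (by omega)]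
        unfold gFill
        rw [if_neg b2]
      rw [← hLrev, h1] at h2
      exact b3 h2
    rw [if_neg hne]
  · have hnb : ∀ k, k < S.toList.length / 2 → ¬ badPair S.toList k :=
      fun k hk => fun hb => hbad ⟨k, hk, hb⟩
    obtain ⟨LA, hrun, hLAlen, hmid, hproc⟩ :=
      loopA_good S.toList (S.toList.length / 2) 0 S.toList (by omega) rfl
        (fun j _ _ => rfl) (fun j hj hc => by omega)
        (fun k _ hk2 => hnb k hk2)
    rw [hrun]
    have hFkey : ∀ j, j < S.toList.length →
        (if S.toList.length % 2 = 1 ∧ LA.getD (S.toList.length / 2) ' ' = '?' then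
          LA.set (S.toList.length / 2) 'a' else LA).getD j ' ' = gFill S.toList j := by
      intro j hj
      by_cases hodd : S.toList.length % 2 = 1 ∧ LA.getD (S.toList.length / 2) ' ' = '?'
      · rw [if_pos hodd]
        by_cases hjm : j = S.toList.length / 2
        · have hodd1 : S.toList.length % 2 = 1 := hodd.1
          rw [hjm, getD_set_self _ _ _ _ (by omega)]
          have ho : S.toList.getD (S.toList.length / 2) ' ' = '?' := by
            rw [← hmid (S.toList.length / 2) (le_refl _) (by omega)]
            exact hodd.2
          have hmm : S.toList.length - 1 - S.toList.length / 2 = S.toList.length / 2 := by omega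
          unfold gFill
          rw [if_pos ho, hmm, if_neg (not_not_intro ho)]
        · rw [getD_set_ne _ _ _ _ _ (by omega)]
          exact hproc j hj (by omega)
      · rw [if_neg hodd]
        rcases Nat.lt_or_ge j (S.toList.length / 2) with hc | hc
        · exact hproc j hj (Or.inl hc)
        · rcases Nat.lt_or_ge j (S.toList.length - S.toList.length / 2) with hc2 | hc2
          · have hodd1 : S.toList.length % 2 = 1 := by omega
            have hjm : j = S.toList.length / 2 := by omega
            have hval := hmid j hc hc2
            have hno : LA.getD j ' ' ≠ '?' := fun h => hodd ⟨hodd1, hjm ▸ h⟩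
            rw [hval] at hno
            rw [hval]
            unfold gFill
            rw [if_neg hno]
          · exact hproc j hj (Or.inr hc2)
    have hFlen : (if S.toList.length % 2 = 1 ∧ LA.getD (S.toList.length / 2) ' ' = '?' then
        LA.set (S.toList.length / 2) 'a' else LA).length = S.toList.length := by
      split <;> simp [hLAlen]
    have hFL : (if S.toList.length % 2 = 1 ∧ LA.getD (S.toList.length / 2) ' ' = '?' then
        LA.set (S.toList.length / 2) 'a' else LA) =
        fillPalLoopB S.toList.length S.toList.length 0 S.toList := by
      apply eq_of_getD _ _ (by rw [hFlen, hBlen])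
      intro j hj
      rw [hFlen] at hj
      rw [hFkey j hj, hBval j hj]
    have hLrev : fillPalLoopB S.toList.length S.toList.length 0 S.toList =
        (fillPalLoopB S.toList.length S.toList.length 0 S.toList).reverse := by
      apply eq_of_getD _ _ (by simp)
      intro j hj
      rw [hBlen] at hj
      rw [hBval j hj, getD_reverse _ _ _ (by omega), hBlen, hBval _ (by omega),
        gFill_symm S.toList j hj hnb]
    rw [if_pos (congrArg String.mk hLrev)]
    exact congrArg String.mk hFL
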